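-- pv_equiv track=rewrite | github.com/doyun0916/CODING_TEST_PRAC | group_study/programmers(1_4).py | solution
-- ===== SOURCE A (Python) =====
-- def solution(s):
--     stack = [s[0]]
--     if len(s) % 2 != 0:            # 문자가 홀수개면 바로 return 0
--         return 0
--     for i in range(1, len(s)):      # 문자 크기만큼 스택에 저장.
--         if not stack:
--             stack.append(s[i])
--             continue
--         if stack[-1] == s[i]:      # 현재 문자와 전에 넣은 문자가 같다면, 둘다 삭제.
--             stack.pop()
--         else:
--             stack.append(s[i])     # 아니면 계속 스택에 저장.
--     if not stack:                  # 마지막에 스택이 비어있다면 성공.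
--         answer = 1
--     else:                          # 아니면 실패.
--         answer = 0
--     return answer
-- ===== SOURCE B (Python) =====
-- def solution(s):
--     cur = s
--     while True:
--         out = []
--         i = 0
--         n = len(cur)
--         while i < n:
--             if i + 1 < n and cur[i] == cur[i + 1]:
--                 i += 2
--             else:
--                 out.append(cur[i])
--                 i += 1
--         nxt = ''.join(out)
--         if nxt == cur:
--             break
--         cur = nxt
--     return 1 if cur == '' else 0
-- ===== Notes on version B (the rewrite author's own statement) =====
-- stated objective: alternative
-- what changed: Replaces A's single left-to-right stack pass with repeated scan-and-remove-adjacent-equal-pairs passes iterated to a fixpoint (no stack, no odd-length shortcut).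
-- crash fix: A raises IndexError on the empty string (it indexes s[0] before anything else); B returns 1 there, the natural answer since the empty string is already fully reduced. — e.g. on solution(""): A raises IndexError, B returns 1
import Mathlib
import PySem

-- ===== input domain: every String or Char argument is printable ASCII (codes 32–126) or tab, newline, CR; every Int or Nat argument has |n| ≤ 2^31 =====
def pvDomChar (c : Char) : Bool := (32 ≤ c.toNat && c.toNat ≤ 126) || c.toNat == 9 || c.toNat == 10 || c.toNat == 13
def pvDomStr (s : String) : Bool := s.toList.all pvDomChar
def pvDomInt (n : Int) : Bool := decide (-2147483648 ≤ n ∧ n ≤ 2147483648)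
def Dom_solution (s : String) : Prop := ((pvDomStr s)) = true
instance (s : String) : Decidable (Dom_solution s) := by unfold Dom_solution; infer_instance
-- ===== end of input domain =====

-- B replaces A's single stack pass by repeated remove-adjacent-equal-pairs passes iterated to a
-- fixpoint (alternative algorithm, not faster); A raises IndexError on "" where B returns 1.

-- ===== PORT A =====
-- one loop step of A: empty stack → push; top equal → pop; else push (stack head = Python stack[-1])
def stepA (st : List Char) (c : Char) : List Char :=
  match st with
  | [] => [c]
  | h :: t => if h = c then t else c :: h :: t

def solution (s : String) : Int :=
  match PySem.Str.pyGet? s 0 with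
  | none => 0   -- unreachable under Pre_solution: Python raises IndexError here
  | some c0 =>
    if PySem.Int.mod (PySem.Str.len s) 2 ≠ 0 then 0
    else
      let stack := (s.toList.drop 1).foldl stepA [c0]
      if stack = [] then 1 else 0

-- ===== PORT B =====
-- one scan of B's inner loop: cur[i] == cur[i+1] → skip both, else keep cur[i]
def passB : List Char → List Char
  | [] => []
  | [a] => [a]
  | a :: b :: t => if a = b then passB t else a :: passB (b :: t)

-- B's outer while-True loop, iterated until passB changes nothing; the fuel l.length is
-- only a totality bound (each non-fixpoint pass strictly shrinks the list, see fixGo_fix)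
def fixGo : Nat → List Char → List Char
  | 0, l => l
  | n + 1, l => if passB l = l then l else fixGo n (passB l)

def fixB (l : List Char) : List Char := fixGo l.length l

def solution_alt (s : String) : Int :=
  if fixB s.toList = [] then 1 else 0

-- ===== PRECONDITION & SPEC =====
-- Pre_ excludes only the empty string, on which A raises IndexError at s[0].
def Pre_solution (s : String) : Prop := s ≠ ""
instance (s : String) : Decidable (Pre_solution s) := by unfold Pre_solution; infer_instance
def pvWitness_solution : String := "baab"

-- A raises IndexError on the empty string (it indexes s[0] first); B returns 1 there,
-- the natural answer since the empty string is already fully reduced.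
def Raises_solution (s : String) : Prop := s = ""
instance (s : String) : Decidable (Raises_solution s) := by unfold Raises_solution; infer_instance
def pvRaiseWitness_solution : String := ""
def pvRaiseWitnessOut_solution : Int := 1

def Spec_solution (s : String) (out : Int) : Prop := out = solution_alt s
instance (s : String) (out : Int) : Decidable (Spec_solution s out) := by unfold Spec_solution; infer_instance

-- ===== CLAIM (what is proved, stated in full; the proofs are below) =====
def Claim_equal_solution : Prop := ∀ (s : String), Dom_solution s → Pre_solution s → Spec_solution s (solution s)
def Claim_raises_solution : Prop := (∀ (s : String), Dom_solution s → Raises_solution s → ¬ Pre_solution s) ∧ (Dom_solution (pvRaiseWitness_solution) ∧ Raises_solution (pvRaiseWitness_solution) ∧ solution_alt (pvRaiseWitness_solution) = pvRaiseWitnessOut_solution)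

-- ===== LEMMAS AND PROOFS =====

-- a pass never lengthens the list, and shortens it unless it is a fixpoint
theorem passB_shrink : ∀ l : List Char, passB l = l ∨ (passB l).length < l.length := by
  intro l
  induction l using passB.induct with
  | case1 => exact Or.inl rfl
  | case2 a => exact Or.inl rfl
  | case3 b t ih =>
    right
    simp only [passB]
    rcases ih with h1 | h1 <;> simp [h1] <;> omega
  | case4 a b t h ih =>
    simp only [passB, if_neg h]
    rcases ih with h1 | h1
    · exact Or.inl (by rw [h1])
    · right; simpa using h1

-- the stack of A, from the empty stack (A's initial [s[0]] = stepA [] s[0])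
def normA (l : List Char) : List Char := l.foldl stepA []

-- A's stack never holds two adjacent equal chars
theorem stepA_chain {st : List Char} (h : st.IsChain (· ≠ ·)) (c : Char) :
    (stepA st c).IsChain (· ≠ ·) := by
  match st, h with
  | [], _ => simp [stepA]
  | [h0], _ =>
    simp only [stepA]
    split <;> simp_all [List.isChain_cons_cons, eq_comm]
  | h0 :: h1 :: t, h =>
    simp only [stepA]
    split
    · exact h.of_cons
    · exact List.isChain_cons_cons.mpr ⟨by simp_all [eq_comm], h⟩

-- pushing the same char twice onto an irreducible stack is the identity
theorem stepA_stepA {st : List Char} (h : st.IsChain (· ≠ ·)) (a : Char) :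
    stepA (stepA st a) a = st := by
  match st, h with
  | [], _ => simp [stepA]
  | h0 :: t, h =>
    by_cases hc : h0 = a
    · subst hc
      simp only [stepA]
      match t, h with
      | [], _ => simp
      | h1 :: t1, h =>
        have : h0 ≠ h1 := (List.isChain_cons_cons.mp h).1
        simp [Ne.symm this]
    · simp [stepA, hc]

-- one passB does not change A's fold result (from any irreducible stack)
theorem foldl_passB (l : List Char) : ∀ st : List Char, st.IsChain (· ≠ ·) →
    (passB l).foldl stepA st = l.foldl stepA st := by
  induction l using passB.induct with
  | case1 => intro st _; rfl
  | case2 a => intro st _; rfl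
  | case3 b t ih =>
    intro st hst
    have hp : passB (b :: b :: t) = passB t := by simp [passB]
    rw [hp, List.foldl_cons, List.foldl_cons, ih st hst, stepA_stepA hst]
  | case4 a b t h ih =>
    intro st hst
    simp only [passB, if_neg h, List.foldl_cons]
    exact ih (stepA st a) (stepA_chain hst a)

-- a fixpoint of passB has no adjacent equal pair
theorem passB_fix_chain : ∀ l : List Char, passB l = l → l.IsChain (· ≠ ·) := by
  intro l
  induction l using passB.induct with
  | case1 => intro _; simp
  | case2 a => intro _; simp
  | case3 b t ih =>
    intro hfix
    exfalso
    rw [passB, if_pos rfl] at hfix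
    have := congrArg List.length hfix
    rcases passB_shrink t with h1 | h1 <;> simp [h1] at this ⊢ <;> omega
  | case4 a b t h ih =>
    intro hfix
    rw [passB, if_neg h] at hfix
    have ht : passB (b :: t) = b :: t := by injection hfix
    exact List.isChain_cons_cons.mpr ⟨h, ih ht⟩

-- A's fold over an irreducible list, from a stack whose head differs from the list's head,
-- only pushes
theorem foldl_irred : ∀ l : List Char, l.IsChain (· ≠ ·) →
    ∀ st : List Char, (∀ a b, l.head? = some a → st.head? = some b → a ≠ b) →
    l.foldl stepA st = l.reverse ++ st := by
  intro l
  induction l with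
  | nil => intro _ st _; simp
  | cons c rest ih =>
    intro hch st hne
    have hstep : stepA st c = c :: st := by
      match st with
      | [] => rfl
      | h0 :: t =>
        have : c ≠ h0 := hne c h0 rfl rfl
        simp [stepA, Ne.symm this]
    simp only [List.foldl_cons, hstep]
    rw [ih hch.of_cons (c :: st) ?_]
    · simp
    · intro a b ha hb
      simp only [List.head?_cons, Option.some.injEq] at hb
      subst hb
      match rest, ha with
      | r0 :: rest', ha =>
        simp only [List.head?_cons, Option.some.injEq] at ha
        subst ha
        exact Ne.symm (List.isChain_cons_cons.mp hch).1

-- parity of the fold result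
theorem foldl_parity : ∀ l st : List Char,
    (l.foldl stepA st).length % 2 = (st.length + l.length) % 2 := by
  intro l
  induction l with
  | nil => intro st; simp
  | cons c rest ih =>
    intro st
    rw [List.foldl_cons, ih]
    have : (stepA st c).length % 2 = (st.length + 1) % 2 := by
      match st with
      | [] => rfl
      | h0 :: t => simp only [stepA]; split <;> simp <;> omega
    simp only [List.length_cons]
    omega

-- fixGo preserves A's fold result
theorem normA_fixGo : ∀ (n : Nat) (l : List Char), normA (fixGo n l) = normA l := by
  intro n
  induction n with
  | zero => intro l; rfl
  | succ n ih =>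
    intro l
    rw [fixGo]
    split
    · rfl
    · rw [ih (passB l)]
      exact foldl_passB l [] (by simp)

-- with fuel ≥ length, fixGo lands on a fixpoint of passB
theorem fixGo_fix : ∀ (n : Nat) (l : List Char), l.length ≤ n → passB (fixGo n l) = fixGo n l := by
  intro n
  induction n with
  | zero =>
    intro l hl
    have : l = [] := List.length_eq_zero_iff.mp (Nat.le_zero.mp hl)
    subst this; rfl
  | succ n ih =>
    intro l hl
    rw [fixGo]
    split
    · assumption
    · rename_i hne
      refine ih (passB l) ?_
      rcases passB_shrink l with h1 | h1
      · exact absurd h1 hne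
      · omega

theorem fixB_chain (l : List Char) : (fixB l).IsChain (· ≠ ·) :=
  passB_fix_chain _ (fixGo_fix l.length l le_rfl)

-- fixB l is empty exactly when A's stack ends empty
theorem fixB_empty_iff (l : List Char) : fixB l = [] ↔ normA l = [] := by
  constructor
  · intro h
    rw [← normA_fixGo l.length l]; rw [fixB] at h; rw [h]; rfl
  · intro h
    have h2 : normA (fixB l) = [] := by rw [fixB, normA_fixGo]; exact h
    have h3 : normA (fixB l) = (fixB l).reverse ++ [] :=
      foldl_irred (fixB l) (fixB_chain l) [] (by intro a b _ hb; simp at hb)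
    rw [h3] at h2
    simpa using h2

theorem normA_length_parity (l : List Char) : (normA l).length % 2 = l.length % 2 := by
  simpa [normA] using foldl_parity l []

theorem solution_eq (s : String) (h : s.toList ≠ []) : solution s = solution_alt s := by
  obtain ⟨c0, rest, hl⟩ : ∃ c0 rest, s.toList = c0 :: rest := by
    cases hlist : s.toList with
    | nil => exact absurd hlist h
    | cons a t => exact ⟨a, t, rfl⟩
  have hget : PySem.Str.pyGet? s 0 = some c0 := by
    rw [PySem.Str.pyGet?_eq]
    simp [hl, PySem.Chars.pyGet?]
  have hnorm : (s.toList.drop 1).foldl stepA [c0] = normA s.toList := by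
    simp [normA, hl, stepA]
  have hlen : PySem.Str.len s = (s.toList.length : Int) := by
    simp [PySem.Str.len_eq]
  have hmodcast : PySem.Int.mod ((s.toList.length : Nat) : Int) 2 = ((s.toList.length % 2 : Nat) : Int) := by
    exact_mod_cast PySem.Int.mod_natCast s.toList.length 2
  rw [solution, solution_alt, hget]
  simp only [hnorm, hlen]
  by_cases hodd : PySem.Int.mod (s.toList.length : Int) 2 ≠ 0
  · rw [if_pos hodd]
    -- odd length: A's stack (and hence fixB's fixpoint) is nonempty, so B returns 0 too
    rw [hmodcast] at hodd
    have hmod : s.toList.length % 2 = 1 := by omega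
    have hnz : normA s.toList ≠ [] := by
      intro hz
      have hp := normA_length_parity s.toList
      rw [hz] at hp
      simp only [List.length_nil] at hp
      omega
    rw [if_neg (fun hfix => hnz ((fixB_empty_iff s.toList).mp hfix))]
  · rw [if_neg hodd]
    by_cases hz : normA s.toList = []
    · rw [if_pos hz, if_pos ((fixB_empty_iff s.toList).mpr hz)]
    · rw [if_neg hz, if_neg (fun hfix => hz ((fixB_empty_iff s.toList).mp hfix))]

-- ===== VERDICT (by name: the statement is the Claim_ definition above) =====
theorem solution_spec : Claim_equal_solution := by
  intro s _ hpre
  unfold Spec_solution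
  exact solution_eq s (fun hnil => hpre (String.toList_eq_nil_iff.mp hnil))

@[simp] theorem solution_raises : Claim_raises_solution := by
  unfold Claim_raises_solution
  exact ⟨fun s _ hr hp => hp hr, by decide⟩
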